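-- pv_equiv track=rewrite | github.com/pb-96/aoc_2025 | aoc2025/day06/day06.py | parse_data_p2
-- ===== SOURCE A (Python) =====
-- def parse_data_p2(data: list[str]):
--     last_line = data[-1]
--     rem = data[:-1]
--     delims = [idx for idx, char in enumerate(last_line) if char in "*+"]
--     ops = [char for char in last_line if char in "*+"]
--
--     columns = [
--         [list(line[start:delims[idx + 1] - 1].replace(" ", "0")) for idx, start in enumerate(delims[: - 1])]
--         for line in rem
--     ]
--
--     chunked = list(zip(*columns))
--
--     last_line = []
--     for line in rem:
--         last_line.append(list(line[delims[-1]: ].replace(" ", "0")))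
--
--     chunked.append(last_line)
--     return zip(chunked, ops)
-- ===== SOURCE B (Python) =====
-- def parse_data_p2(data: list[str]):
--     last_line = data[-1]
--     rem = data[:-1]
--     delims = [idx for idx, char in enumerate(last_line) if char in "*+"]
--     ops = [char for char in last_line if char in "*+"]
--
--     # build the grid column-by-column: no row building, no zip(*...) transpose
--     columns = [
--         tuple(list(line[delims[j]:delims[j + 1] - 1].replace(" ", "0")) for line in rem)
--         for j in range(len(delims) - 1)
--     ]
--     columns.append([list(line[delims[-1]:].replace(" ", "0")) for line in rem])
--     return zip(columns, ops)
-- ===== Notes on version B (the rewrite author's own statement) =====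
-- stated objective: simpler
-- what changed: B builds the result column-by-column directly (one comprehension per operator column plus the final column), removing A's row-major grid, the zip(*columns) transpose and the separate accumulator loop for the last column.
-- intended difference: On inputs with no data rows but >= 2 operators in the last line, A's zip(*[]) collapses all operator columns and returns a single pair ([], first op), while B returns one empty column per operator, the per-operator shape every non-degenerate input has. — e.g. on parse_data_p2(["*+"]): A returns [([], "*")], B returns [([], "*"), ([], "+")]
-- outside the precondition, e.g. on parse_data_p2([]): A raises IndexError, B raises IndexError
import Mathlib
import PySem

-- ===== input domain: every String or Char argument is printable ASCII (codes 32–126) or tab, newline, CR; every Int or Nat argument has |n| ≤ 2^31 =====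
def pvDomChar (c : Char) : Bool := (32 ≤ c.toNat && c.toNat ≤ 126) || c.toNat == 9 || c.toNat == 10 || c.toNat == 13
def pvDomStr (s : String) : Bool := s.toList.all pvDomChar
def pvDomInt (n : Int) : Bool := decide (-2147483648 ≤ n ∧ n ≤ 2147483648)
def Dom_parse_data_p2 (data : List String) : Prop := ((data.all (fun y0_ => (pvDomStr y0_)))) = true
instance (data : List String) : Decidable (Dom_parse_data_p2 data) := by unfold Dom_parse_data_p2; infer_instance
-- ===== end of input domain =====

-- B builds the result column-by-column directly, removing A's row-major grid, the zip(*columns)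
-- transpose and the separate accumulator loop for the last column (objective: simpler).

-- ===== PORT A =====
-- list(line[a:b].replace(" ", "0"))  — shared cell expression, identical in both Pythons
def pvCell (line : String) (a : Int) (b? : Option Int) : List String :=
  (PySem.Str.replace (PySem.Str.slice line (some a) b?) " " "0").toList.map (fun c => String.ofList [c])

-- list(zip(*rows)) : tuples of the i-th elements while every row still has one
def pvZipStarAux {α : Type} [Inhabited α] : List α → List (List α) → List (List α)
  | [], _ => []
  | a :: rt, rs =>
    if rs.all (fun l => !l.isEmpty) then
      (a :: rs.map List.headI) :: pvZipStarAux rt (rs.map List.tail)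
    else []

def pvZipStar {α : Type} [Inhabited α] : List (List α) → List (List α)
  | [] => []
  | r :: rs => pvZipStarAux r rs

def parse_data_p2 (data : List String) : List (List (List String) × String) :=
  match PySem.List.pyGet? data (-1) with
  | none => []   -- data[-1]: IndexError, excluded by Pre_
  | some last_line =>
    let rem := PySem.List.slice data none (some (-1))
    let delims : List Int := (PySem.List.enumerate last_line.toList).filterMap
        (fun p => if p.2 = '*' ∨ p.2 = '+' then some p.1 else none)
    let ops : List String := last_line.toList.filterMap
        (fun c => if c = '*' ∨ c = '+' then some (String.ofList [c]) else none)
    let columns : List (List (List String)) := rem.map (fun line =>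
        (PySem.List.enumerate (PySem.List.slice delims none (some (-1)))).map
          (fun p => pvCell line p.2 (some (PySem.List.pyGetD delims (p.1 + 1) 0 - 1))))
    let chunked := pvZipStar columns
    match PySem.List.pyGet? delims (-1) with
    | none => []   -- no operators: under Pre_ rem is empty, the loop never reads delims[-1],
                   -- and zip(chunked, []) = [] (with data rows Python raises: excluded by Pre_)
    | some dl =>
      let lastCol := rem.foldl (fun acc line => acc ++ [pvCell line dl none]) []
      (chunked ++ [lastCol]).zip ops

-- ===== PORT B =====
def parse_data_p2_alt (data : List String) : List (List (List String) × String) :=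
  match PySem.List.pyGet? data (-1) with
  | none => []   -- data[-1]: IndexError, excluded by Pre_
  | some last_line =>
    let rem := PySem.List.slice data none (some (-1))
    let delims : List Int := (PySem.List.enumerate last_line.toList).filterMap
        (fun p => if p.2 = '*' ∨ p.2 = '+' then some p.1 else none)
    let ops : List String := last_line.toList.filterMap
        (fun c => if c = '*' ∨ c = '+' then some (String.ofList [c]) else none)
    let columns : List (List (List String)) :=
      (PySem.List.pyRange 0 ((delims.length : Int) - 1)).map (fun j =>
        rem.map (fun line =>
          pvCell line (PySem.List.pyGetD delims j 0) (some (PySem.List.pyGetD delims (j + 1) 0 - 1))))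
    match PySem.List.pyGet? delims (-1) with
    | none => []   -- no operators: under Pre_ rem is empty, the comprehension never reads
                   -- delims[-1], and zip([[]], []) = [] (with data rows: excluded by Pre_)
    | some dl =>
      (columns ++ [rem.map (fun line => pvCell line dl none)]).zip ops

-- ===== PRECONDITION & SPEC =====
-- Pre_ excludes exactly the inputs where A raises IndexError: empty data (data[-1]), and
-- data rows present with no '*'/'+' in the last line (delims[-1] inside the row loop).
def Pre_parse_data_p2 (data : List String) : Prop :=
  data ≠ [] ∧
  (data.dropLast ≠ [] →
    0 < (data.getLastD "").toList.countP (fun c => decide (c = '*' ∨ c = '+')))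
instance (data : List String) : Decidable (Pre_parse_data_p2 data) := by unfold Pre_parse_data_p2; infer_instance

def pvWitness_parse_data_p2 : List String := ["1 2", "  3", "*  +"]

-- On inputs with no data rows but ≥ 2 operators in the last line, A's zip(*[]) collapses all
-- operator columns into a single empty one and returns one pair, while B returns the intended
-- one empty column per operator — the per-operator shape every non-degenerate input has.
def D_parse_data_p2 (data : List String) : Prop :=
  data.dropLast = [] ∧
  2 ≤ (data.getLastD "").toList.countP (fun c => decide (c = '*' ∨ c = '+'))
instance (data : List String) : Decidable (D_parse_data_p2 data) := by unfold D_parse_data_p2; infer_instance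

def Spec_parse_data_p2 (data : List String) (out : List (List (List String) × String)) : Prop := ¬ D_parse_data_p2 data → out = parse_data_p2_alt data
instance (data : List String) (out : List (List (List String) × String)) : Decidable (Spec_parse_data_p2 data out) := by unfold Spec_parse_data_p2; infer_instance

def pvDiffWitness_parse_data_p2 : List String := ["*+"]
def pvDiffWitnessOut_parse_data_p2 : (List (List (List String) × String)) × (List (List (List String) × String)) :=
  ([([], "*")], [([], "*"), ([], "+")])

-- ===== CLAIM (what is proved, stated in full; the proofs are below) =====
def Claim_unchanged_parse_data_p2 : Prop := ∀ (data : List String), Dom_parse_data_p2 data → Pre_parse_data_p2 data → Spec_parse_data_p2 data (parse_data_p2 data)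
def Claim_changed_parse_data_p2 : Prop := Dom_parse_data_p2 (pvDiffWitness_parse_data_p2) ∧ Pre_parse_data_p2 (pvDiffWitness_parse_data_p2) ∧ D_parse_data_p2 (pvDiffWitness_parse_data_p2) ∧ parse_data_p2 (pvDiffWitness_parse_data_p2) = pvDiffWitnessOut_parse_data_p2.1 ∧ parse_data_p2_alt (pvDiffWitness_parse_data_p2) = pvDiffWitnessOut_parse_data_p2.2 ∧ pvDiffWitnessOut_parse_data_p2.1 ≠ pvDiffWitnessOut_parse_data_p2.2
def Claim_exact_parse_data_p2 : Prop := ∀ (data : List String), Dom_parse_data_p2 data → Pre_parse_data_p2 data → D_parse_data_p2 data → parse_data_p2 data ≠ parse_data_p2_alt data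

-- ===== LEMMAS AND PROOFS =====

-- the length of the delimiter list is the operator count of the last line
theorem pv_length_delims (xs : List Char) (s : Int) :
    ((PySem.List.enumerate xs s).filterMap
      (fun p => if p.2 = '*' ∨ p.2 = '+' then some p.1 else none)).length
    = xs.countP (fun c => decide (c = '*' ∨ c = '+')) := by
  induction xs generalizing s with
  | nil => simp [PySem.List.enumerate_nil]
  | cons c cs ih =>
    simp only [PySem.List.enumerate_cons, List.filterMap_cons, List.countP_cons]
    by_cases h : c = '*' ∨ c = '+' <;> simp [h, ih]

-- the length of the operator list is the operator count of the last line
theorem pv_length_ops (xs : List Char) :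
    (xs.filterMap (fun c => if c = '*' ∨ c = '+' then some (String.ofList [c]) else none)).length
    = xs.countP (fun c => decide (c = '*' ∨ c = '+')) := by
  induction xs with
  | nil => simp
  | cons c cs ih => by_cases h : c = '*' ∨ c = '+' <;> simp [h, ih]

-- transpose of a rectangular row-major grid is the column-major grid (nonempty row list)
theorem pv_zipstar_map {α β : Type} [Inhabited β] (g : α → Int → β) (r : List Int) (xs : List α)
    (hxs : xs ≠ []) :
    pvZipStar (xs.map (fun x => r.map (g x))) = r.map (fun j => xs.map (fun x => g x j)) := by
  induction r generalizing xs with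
  | nil =>
    cases xs with
    | nil => simp at hxs
    | cons x xs' => simp [pvZipStar, pvZipStarAux]
  | cons j r' ih =>
    cases xs with
    | nil => simp at hxs
    | cons x xs' =>
      simp only [List.map_cons]
      rw [pvZipStar, pvZipStarAux]
      rw [if_pos (by simp [List.all_map, List.isEmpty])]
      simp only [List.map_map, Function.comp_def, List.headI_cons, List.tail_cons]
      have := ih (x :: xs') (by simp)
      simp only [List.map_cons] at this
      rw [show pvZipStarAux (List.map (g x) r') (List.map (fun x => List.map (g x) r') xs')
            = pvZipStar (List.map (g x) r' :: List.map (fun x => List.map (g x) r') xs') from rfl]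
      rw [this]

-- ===== VERDICT (by name: the statement is the Claim_ definition above) =====
theorem parse_data_p2_spec : Claim_unchanged_parse_data_p2 := by
  intro data _ hpre
  obtain ⟨hne, -⟩ := hpre
  unfold Spec_parse_data_p2
  intro hnd
  unfold parse_data_p2 parse_data_p2_alt
  rw [PySem.List.pyGet?_neg_one]
  cases hL : data.getLast? with
  | none => exact absurd (List.getLast?_eq_none_iff.mp hL) hne
  | some L =>
    have hLD : data.getLastD "" = L := by
      cases data with
      | nil => exact absurd rfl hne
      | cons a t => simp [List.getLastD_eq_getLast?, hL]
    rw [D_parse_data_p2, hLD] at hnd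
    simp only []
    set delims : List Int := (PySem.List.enumerate L.toList).filterMap
        (fun p => if p.2 = '*' ∨ p.2 = '+' then some p.1 else none) with hdel
    have hlen : delims.length = L.toList.countP (fun c => decide (c = '*' ∨ c = '+')) :=
      pv_length_delims L.toList 0
    rw [PySem.List.pyGet?_neg_one]
    cases hdl : delims.getLast? with
    | none => rfl
    | some dl =>
      have hdne : delims ≠ [] := by
        intro h
        rw [h] at hdl
        simp at hdl
      simp only []
      rw [PySem.List.foldl_append_singleton_eq_map]
      set rem := PySem.List.slice data none (some (-1)) with hrem
      have hremd : rem = data.dropLast := PySem.List.slice_to_neg_one data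
      -- reduce to equality of the non-last columns
      congr 2
      · -- pvZipStar (rem.map rowA) = colsB
        by_cases hre : rem = []
        · -- no data rows: ¬D_ gives at most one operator, so both sides are []
          have h1 : delims.length = 1 := by
            have h2 : ¬ 2 ≤ L.toList.countP (fun c => decide (c = '*' ∨ c = '+')) :=
              fun h2 => hnd ⟨hremd ▸ hre, h2⟩
            have h3 : 0 < delims.length := List.length_pos_iff.mpr hdne
            omega
          have hr0 : PySem.List.pyRange 0 ((delims.length : Int) - 1) = [] := by
            rw [h1]; simp [pysem]
          rw [hre, hr0]
          simp [pvZipStar]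
        · -- data rows present: rewrite A's rows as range-maps and transpose
          rw [PySem.List.enumerate_eq_map_pyRange (PySem.List.slice delims none (some (-1))) 0]
          simp only [PySem.List.slice_to_neg_one, List.map_map, Function.comp_def]
          rw [show PySem.List.len delims.dropLast = ((delims.length : Int) - 1) by
            have : 0 < delims.length := List.length_pos_iff.mpr hdne
            simp [PySem.List.len]; omega]
          rw [pv_zipstar_map
            (fun line j => pvCell line (PySem.List.pyGetD delims.dropLast j 0)
              (some (PySem.List.pyGetD delims (j + 1) 0 - 1)))
            (PySem.List.pyRange 0 ((delims.length : Int) - 1)) rem hre]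
          apply List.map_congr_left
          intro j hj
          have hjb : 0 ≤ j ∧ j < (delims.length : Int) - 1 := PySem.List.mem_pyRange_one.mp hj
          apply List.map_congr_left
          intro line _
          -- pyGetD on dropLast agrees with pyGetD on the full list below the last index
          have hg : PySem.List.pyGetD delims.dropLast j 0 = PySem.List.pyGetD delims j 0 := by
            rw [PySem.List.pyGetD_eq_getElem delims.dropLast 0 hjb.1
                  (by simp only [List.length_dropLast]; omega),
                PySem.List.pyGetD_eq_getElem delims 0 hjb.1 (by omega)]
            simp [List.getElem_dropLast]
          rw [hg]

theorem parse_data_p2_changed : Claim_changed_parse_data_p2 := by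
  unfold Claim_changed_parse_data_p2
  decide

theorem parse_data_p2_tight : Claim_exact_parse_data_p2 := by
  intro data _ hpre hd
  obtain ⟨hne, -⟩ := hpre
  rw [D_parse_data_p2] at hd
  obtain ⟨hd1, hd2⟩ := hd
  unfold parse_data_p2 parse_data_p2_alt
  rw [PySem.List.pyGet?_neg_one]
  cases hL : data.getLast? with
  | none => exact absurd (List.getLast?_eq_none_iff.mp hL) hne
  | some L =>
    have hLD : data.getLastD "" = L := by
      cases data with
      | nil => exact absurd rfl hne
      | cons a t => simp [List.getLastD_eq_getLast?, hL]
    rw [hLD] at hd2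
    simp only []
    set delims : List Int := (PySem.List.enumerate L.toList).filterMap
        (fun p => if p.2 = '*' ∨ p.2 = '+' then some p.1 else none) with hdel
    have hlen : delims.length = L.toList.countP (fun c => decide (c = '*' ∨ c = '+')) :=
      pv_length_delims L.toList 0
    rw [PySem.List.pyGet?_neg_one]
    cases hdl : delims.getLast? with
    | none =>
      exfalso
      have : delims = [] := List.getLast?_eq_none_iff.mp hdl
      rw [this] at hlen
      simp only [List.length_nil] at hlen
      omega
    | some dl =>
      simp only []
      set rem := PySem.List.slice data none (some (-1)) with hrem
      have hremd : rem = [] := by rw [hrem, PySem.List.slice_to_neg_one data, hd1]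
      rw [hremd]
      intro heq
      have hcast : ((delims.length : Int) - 1) = ((delims.length - 1 : Nat) : Int) := by omega
      have hlens := congrArg List.length heq
      rw [hcast] at hlens
      simp only [List.map_nil, List.foldl_nil, pvZipStar, List.length_zip, List.length_append,
        List.length_map, List.length_nil, List.length_cons, pv_length_ops, pysem] at hlens
      omega
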